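-- pv_equiv track=rewrite | github.com/NateJoshuaSmith/Algorithms | algo_anim.py | quick_sort_anim
-- ===== SOURCE A (Python) =====
-- def quick_sort_anim(arr):
--     arr = arr.copy()
--     def quicksort(l, r):
--         if l >= r:
--             return
--         pivot = arr[(l + r) // 2]
--         i, j = l, r
--         while i <= j:
--             while i <= j and arr[i] < pivot:
--                 i += 1
--             while i <= j and arr[j] > pivot:
--                 j -= 1
--             if i <= j:
--                 arr[i], arr[j] = arr[j], arr[i]
--                 yield arr[:]
--                 i += 1
--                 j -= 1
--         yield from quicksort(l, j)
--         yield from quicksort(i, r)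
--     yield from quicksort(0, len(arr) - 1)
--     yield arr[:]
-- ===== SOURCE B (Python) =====
-- def quick_sort_anim(arr):
--     arr = arr.copy()
--     stack = [(0, len(arr) - 1)]
--     while stack:
--         l, r = stack.pop()
--         if l >= r:
--             continue
--         pivot = arr[(l + r) // 2]
--         i, j = l, r
--         while i <= j:
--             if arr[i] < pivot:
--                 i += 1
--             elif arr[j] > pivot:
--                 j -= 1
--             else:
--                 arr[i], arr[j] = arr[j], arr[i]
--                 yield arr[:]
--                 i += 1
--                 j -= 1
--         stack.append((i, r))
--         stack.append((l, j))
--     yield arr[:]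
-- ===== Notes on version B (the rewrite author's own statement) =====
-- stated objective: alternative
-- what changed: Replaces the recursive generator with an explicit stack of (l,r) ranges popped in one while loop (pushing (i,r) then (l,j) so the left range runs first), and flattens the two nested scan loops of the partition into a single one-step-per-iteration loop (advance i, or retreat j, or swap-and-yield) that produces the identical frame sequence.
import Mathlib
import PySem

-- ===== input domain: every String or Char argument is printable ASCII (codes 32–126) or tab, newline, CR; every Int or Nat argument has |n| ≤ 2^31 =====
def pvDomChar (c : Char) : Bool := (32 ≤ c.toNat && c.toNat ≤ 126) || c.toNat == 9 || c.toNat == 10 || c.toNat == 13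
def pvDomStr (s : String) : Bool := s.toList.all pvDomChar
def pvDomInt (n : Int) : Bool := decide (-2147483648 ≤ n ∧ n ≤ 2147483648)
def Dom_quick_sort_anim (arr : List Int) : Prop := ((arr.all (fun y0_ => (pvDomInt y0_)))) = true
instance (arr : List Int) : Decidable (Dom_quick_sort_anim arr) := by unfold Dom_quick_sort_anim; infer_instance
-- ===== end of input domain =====

-- B replaces A's recursive generator by an explicit stack of (l, r) ranges popped in one
-- while loop, and flattens A's two nested scan loops into a single one-step-per-iteration
-- partition loop (advance i / retreat j / swap-and-yield); objective: alternative
-- decomposition, identical frame sequence. A copies its argument, so neither version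
-- mutates the caller's list.
-- A's loops are written with a structural fuel parameter; every fuel passed is proved
-- sufficient by the lemmas below.

-- ===== PORT A =====
-- arr[k] read; every read performed by the algorithm is in range (0 ≤ k < len), where .getD is exact
def pvAt (arr : List Int) (k : Int) : Int := (PySem.List.pyGet? arr k).getD 0
-- arr[k] = v write; every write performed by the algorithm is in range, where this is exact
def pvSet (arr : List Int) (k : Int) (v : Int) : List Int :=
  if 0 ≤ k ∧ k < (arr.length : Int) then arr.set k.toNat v else arr
-- `arr[i], arr[j] = arr[j], arr[i]`
def pvSwap (arr : List Int) (i j : Int) : List Int :=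
  pvSet (pvSet arr i (pvAt arr j)) j (pvAt arr i)

-- `while i <= j and arr[i] < pivot: i += 1` (fuel (j - i + 1).toNat is exact)
def pvScanI (arr : List Int) (pivot : Int) : Nat → Int → Int → Int
  | 0, i, _ => i
  | fuel + 1, i, j =>
    if i ≤ j ∧ pvAt arr i < pivot then pvScanI arr pivot fuel (i + 1) j else i

-- `while i <= j and arr[j] > pivot: j -= 1`
def pvScanJ (arr : List Int) (pivot : Int) : Nat → Int → Int → Int
  | 0, _, j => j
  | fuel + 1, i, j =>
    if i ≤ j ∧ pivot < pvAt arr j then pvScanJ arr pivot fuel i (j - 1) else j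

-- A's outer `while i <= j:` partition loop; returns (arr, i, j, frames yielded)
def pvPart (pivot : Int) : Nat → List Int → Int → Int → List Int × Int × Int × List (List Int)
  | 0, arr, i, j => (arr, i, j, [])
  | fuel + 1, arr, i, j =>
    if i ≤ j then
      if pvScanI arr pivot (j - i + 1).toNat i j ≤ pvScanJ arr pivot (j - pvScanI arr pivot (j - i + 1).toNat i j + 1).toNat (pvScanI arr pivot (j - i + 1).toNat i j) j then
        ((pvPart pivot fuel (pvSwap arr (pvScanI arr pivot (j - i + 1).toNat i j) (pvScanJ arr pivot (j - pvScanI arr pivot (j - i + 1).toNat i j + 1).toNat (pvScanI arr pivot (j - i + 1).toNat i j) j)) ((pvScanI arr pivot (j - i + 1).toNat i j) + 1) ((pvScanJ arr pivot (j - pvScanI arr pivot (j - i + 1).toNat i j + 1).toNat (pvScanI arr pivot (j - i + 1).toNat i j) j) - 1)).1, (pvPart pivot fuel (pvSwap arr (pvScanI arr pivot (j - i + 1).toNat i j) (pvScanJ arr pivot (j - pvScanI arr pivot (j - i + 1).toNat i j + 1).toNat (pvScanI arr pivot (j - i + 1).toNat i j) j)) ((pvScanI arr pivot (j - i + 1).toNat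 i j) + 1) ((pvScanJ arr pivot (j - pvScanI arr pivot (j - i + 1).toNat i j + 1).toNat (pvScanI arr pivot (j - i + 1).toNat i j) j) - 1)).2.1, (pvPart pivot fuel (pvSwap arr (pvScanI arr pivot (j - i + 1).toNat i j) (pvScanJ arr pivot (j - pvScanI arr pivot (j - i + 1).toNat i j + 1).toNat (pvScanI arr pivot (j - i + 1).toNat i j) j)) ((pvScanI arr pivot (j - i + 1).toNat i j) + 1) ((pvScanJ arr pivot (j - pvScanI arr pivot (j - i + 1).toNat i j + 1).toNat (pvScanI arr pivot (j - i + 1).toNat i j) j) - 1)).2.2.1,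
         pvSwap arr (pvScanI arr pivot (j - i + 1).toNat i j) (pvScanJ arr pivot (j - pvScanI arr pivot (j - i + 1).toNat i j + 1).toNat (pvScanI arr pivot (j - i + 1).toNat i j) j) :: (pvPart pivot fuel (pvSwap arr (pvScanI arr pivot (j - i + 1).toNat i j) (pvScanJ arr pivot (j - pvScanI arr pivot (j - i + 1).toNat i j + 1).toNat (pvScanI arr pivot (j - i + 1).toNat i j) j)) ((pvScanI arr pivot (j - i + 1).toNat i j) + 1) ((pvScanJ arr pivot (j - pvScanI arr pivot (j - i + 1).toNat i j + 1).toNat (pvScanI arr pivot (j - i + 1).toNat i j) j) - 1)).2.2.2)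
      else (arr, pvScanI arr pivot (j - i + 1).toNat i j, pvScanJ arr pivot (j - pvScanI arr pivot (j - i + 1).toNat i j + 1).toNat (pvScanI arr pivot (j - i + 1).toNat i j) j, [])
    else (arr, i, j, [])

-- A's inner generator `quicksort(l, r)`: returns (final arr, frames yielded)
def pvQuickRec : Nat → List Int → Int → Int → List Int × List (List Int)
  | 0, arr, _, _ => (arr, [])
  | fuel + 1, arr, l, r =>
    if l ≥ r then (arr, [])
    else
      ((pvQuickRec fuel (pvQuickRec fuel (pvPart (pvAt arr (PySem.Int.floordiv (l + r) 2)) (r - l + 1).toNat arr l r).1 l (pvPart (pvAt arr (PySem.Int.floordiv (l + r) 2)) (r - l + 1).toNat arr l r).2.2.1).1 (pvPart (pvAt arr (PySem.Int.floordiv (l + r) 2)) (r - l + 1).toNat arr l r).2.1 r).1, (pvPart (pvAt arr (PySem.Int.floordiv (l + r) 2)) (r - l + 1).toNat arr l r).2.2.2 ++ (pvQuickRec fuel (pvPart (pvAt arr (PySem.Int.floordiv (l + r) 2)) (r - l + 1).toNat arr l r).1 l (pvPart (pvAt arr (PySem.Int.floordiv (l + r) 2)) (r - l + 1).toNat arr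 l r).2.2.1).2 ++ (pvQuickRec fuel (pvQuickRec fuel (pvPart (pvAt arr (PySem.Int.floordiv (l + r) 2)) (r - l + 1).toNat arr l r).1 l (pvPart (pvAt arr (PySem.Int.floordiv (l + r) 2)) (r - l + 1).toNat arr l r).2.2.1).1 (pvPart (pvAt arr (PySem.Int.floordiv (l + r) 2)) (r - l + 1).toNat arr l r).2.1 r).2)

def quick_sort_anim (arr : List Int) : List (List Int) :=
  let q := pvQuickRec arr.length arr 0 ((arr.length : Int) - 1)
  q.2 ++ [q.1]

-- ===== PORT B =====
-- Source B's flattened `while i <= j:` partition loop: one comparison per iteration —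
-- advance i, or retreat j, or swap-and-record; returns (arr, i, j, frames so far)
def pvBStep (pivot : Int) (arr : List Int) (i j : Int) (frames : List (List Int)) :
    List Int × Int × Int × List (List Int) :=
  if _h : i ≤ j then
    if pvAt arr i < pivot then
      pvBStep pivot arr (i + 1) j frames
    else if pivot < pvAt arr j then
      pvBStep pivot arr i (j - 1) frames
    else
      pvBStep pivot (pvSwap arr i j) (i + 1) (j - 1) (frames ++ [pvSwap arr i j])
  else (arr, i, j, frames)
termination_by (j - i + 2).toNat
decreasing_by all_goals omega

-- Source B's `while stack:` loop; pops (l, r) from the head (Source B's list end), partitions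
-- with pvBStep and pushes (i, r) then (l, j) so (l, j) is popped next
def pvStackRun : Nat → List Int → List (Int × Int) → List (List Int) → List Int × List (List Int)
  | _, arr, [], frames => (arr, frames)
  | 0, arr, _ :: _, frames => (arr, frames)
  | fuel + 1, arr, (l, r) :: rest, frames =>
    if l ≥ r then pvStackRun fuel arr rest frames
    else
      pvStackRun fuel (pvBStep (pvAt arr (PySem.Int.floordiv (l + r) 2)) arr l r frames).1
        ((l, (pvBStep (pvAt arr (PySem.Int.floordiv (l + r) 2)) arr l r frames).2.2.1) ::
          ((pvBStep (pvAt arr (PySem.Int.floordiv (l + r) 2)) arr l r frames).2.1, r) :: rest)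
        (pvBStep (pvAt arr (PySem.Int.floordiv (l + r) 2)) arr l r frames).2.2.2

def quick_sort_anim_alt (arr : List Int) : List (List Int) :=
  let q := pvStackRun (3 ^ arr.length) arr [(0, (arr.length : Int) - 1)] []
  q.2 ++ [q.1]

-- ===== PRECONDITION & SPEC =====
def Spec_quick_sort_anim (arr : List Int) (out : List (List Int)) : Prop := out = quick_sort_anim_alt arr
instance (arr : List Int) (out : List (List Int)) : Decidable (Spec_quick_sort_anim arr out) := by unfold Spec_quick_sort_anim; infer_instance

-- ===== CLAIM (what is proved, stated in full; the proofs are below) =====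
def Claim_equal_quick_sort_anim : Prop := ∀ (arr : List Int), Dom_quick_sort_anim arr → Spec_quick_sort_anim arr (quick_sort_anim arr)

-- ===== LEMMAS AND PROOFS =====

theorem pvScanI_ge (arr : List Int) (pivot : Int) (f : Nat) (i j : Int) :
    i ≤ pvScanI arr pivot f i j := by
  induction f generalizing i with
  | zero => simp [pvScanI]
  | succ f ih =>
    rw [pvScanI]
    split
    · have := ih (i + 1); omega
    · omega

theorem pvScanJ_le (arr : List Int) (pivot : Int) (f : Nat) (i j : Int) :
    pvScanJ arr pivot f i j ≤ j := by
  induction f generalizing j with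
  | zero => simp [pvScanJ]
  | succ f ih =>
    rw [pvScanJ]
    split
    · have := ih (j - 1); omega
    · omega

-- the i-scan stops at (or before) any in-window index m whose value is not below the pivot
theorem pvScanI_le_mark (arr : List Int) (pivot : Int) (f : Nat) (i j m : Int)
    (hm : i ≤ m) (hmj : m ≤ j) (hv : ¬ pvAt arr m < pivot) (hf : (j - i + 1).toNat ≤ f) :
    pvScanI arr pivot f i j ≤ m := by
  induction f generalizing i with
  | zero => omega
  | succ f ih =>
    rw [pvScanI]
    split
    · rename_i h
      rcases eq_or_lt_of_le hm with he | hlt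
      · exact absurd (he ▸ h.2) hv
      · exact ih (i + 1) (by omega) (by omega)
    · omega

-- the j-scan stops at (or after) any in-window index m whose value is not above the pivot
theorem pvScanJ_ge_mark (arr : List Int) (pivot : Int) (f : Nat) (i j m : Int)
    (hm : i ≤ m) (hmj : m ≤ j) (hv : ¬ pivot < pvAt arr m) (hf : (j - i + 1).toNat ≤ f) :
    m ≤ pvScanJ arr pivot f i j := by
  induction f generalizing j with
  | zero => omega
  | succ f ih =>
    rw [pvScanJ]
    split
    · rename_i h
      rcases eq_or_lt_of_le hmj with he | hlt
      · exact absurd (he ▸ h.2) hv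
      · exact ih (j - 1) (by omega) (by omega)
    · omega

-- with sufficient fuel the i-scan stops only because its condition fails
theorem pvScanI_stop (arr : List Int) (pivot : Int) (f : Nat) (i j : Int)
    (hf : (j - i + 1).toNat ≤ f) :
    j < pvScanI arr pivot f i j ∨ ¬ pvAt arr (pvScanI arr pivot f i j) < pivot := by
  induction f generalizing i with
  | zero => left; simp [pvScanI]; omega
  | succ f ih =>
    rw [pvScanI]
    split
    · rename_i h
      exact ih (i + 1) (by omega)
    · rename_i h
      by_cases hij : i ≤ j
      · right; intro hlt; exact h ⟨hij, hlt⟩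
      · left; omega

theorem pvScanJ_stop (arr : List Int) (pivot : Int) (f : Nat) (i j : Int)
    (hf : (j - i + 1).toNat ≤ f) :
    pvScanJ arr pivot f i j < i ∨ ¬ pivot < pvAt arr (pvScanJ arr pivot f i j) := by
  induction f generalizing j with
  | zero => left; simp [pvScanJ]; omega
  | succ f ih =>
    rw [pvScanJ]
    split
    · rename_i h
      exact ih (j - 1) (by omega)
    · rename_i h
      by_cases hij : i ≤ j
      · right; intro hlt; exact h ⟨hij, hlt⟩
      · left; omega

theorem pvPart_i_ge (pivot : Int) (f : Nat) (arr : List Int) (i j : Int) :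
    i ≤ (pvPart pivot f arr i j).2.1 := by
  induction f generalizing arr i j with
  | zero => simp [pvPart]
  | succ f ih =>
    rw [pvPart]
    split
    · rename_i h
      have hg := pvScanI_ge arr pivot (j - i + 1).toNat i j
      split
      · rename_i h2
        exact le_trans (by omega)
          (ih (pvSwap arr (pvScanI arr pivot (j - i + 1).toNat i j) (pvScanJ arr pivot (j - pvScanI arr pivot (j - i + 1).toNat i j + 1).toNat (pvScanI arr pivot (j - i + 1).toNat i j) j)) ((pvScanI arr pivot (j - i + 1).toNat i j) + 1) ((pvScanJ arr pivot (j - pvScanI arr pivot (j - i + 1).toNat i j + 1).toNat (pvScanI arr pivot (j - i + 1).toNat i j) j) - 1))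
      · simpa using hg
    · simp

theorem pvPart_j_le (pivot : Int) (f : Nat) (arr : List Int) (i j : Int) :
    (pvPart pivot f arr i j).2.2.1 ≤ j := by
  induction f generalizing arr i j with
  | zero => simp [pvPart]
  | succ f ih =>
    rw [pvPart]
    split
    · rename_i h
      have hl := pvScanJ_le arr pivot (j - pvScanI arr pivot (j - i + 1).toNat i j + 1).toNat (pvScanI arr pivot (j - i + 1).toNat i j) j
      split
      · rename_i h2
        exact le_trans
          (ih (pvSwap arr (pvScanI arr pivot (j - i + 1).toNat i j) (pvScanJ arr pivot (j - pvScanI arr pivot (j - i + 1).toNat i j + 1).toNat (pvScanI arr pivot (j - i + 1).toNat i j) j)) ((pvScanI arr pivot (j - i + 1).toNat i j) + 1) ((pvScanJ arr pivot (j - pvScanI arr pivot (j - i + 1).toNat i j + 1).toNat (pvScanI arr pivot (j - i + 1).toNat i j) j) - 1)) (by omega)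
      · simpa using hl
    · simp

-- a trivial window returns immediately whatever the fuel
theorem pvPart_stop (pivot : Int) (f : Nat) (arr : List Int) (i j : Int) (h : j < i) :
    pvPart pivot f arr i j = (arr, i, j, []) := by
  cases f with
  | zero => rfl
  | succ f => rw [pvPart, if_neg (by omega)]

-- any two sufficient fuels give the same partition result
theorem pvPart_mono (pivot : Int) (f f' : Nat) (arr : List Int) (i j : Int)
    (hf : (j - i + 1).toNat ≤ f) (hf' : (j - i + 1).toNat ≤ f') :
    pvPart pivot f arr i j = pvPart pivot f' arr i j := by
  induction f generalizing f' arr i j with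
  | zero => rw [pvPart_stop pivot 0 arr i j (by omega), pvPart_stop pivot f' arr i j (by omega)]
  | succ f ih =>
    by_cases hij : i ≤ j
    · obtain ⟨g, rfl⟩ : ∃ g, f' = g + 1 := ⟨f' - 1, by omega⟩
      rw [pvPart, pvPart, if_pos hij, if_pos hij]
      have hg := pvScanI_ge arr pivot (j - i + 1).toNat i j
      have hl := pvScanJ_le arr pivot (j - pvScanI arr pivot (j - i + 1).toNat i j + 1).toNat (pvScanI arr pivot (j - i + 1).toNat i j) j
      split
      · rename_i h2
        rw [ih g (pvSwap arr (pvScanI arr pivot (j - i + 1).toNat i j) (pvScanJ arr pivot (j - pvScanI arr pivot (j - i + 1).toNat i j + 1).toNat (pvScanI arr pivot (j - i + 1).toNat i j) j)) ((pvScanI arr pivot (j - i + 1).toNat i j) + 1) ((pvScanJ arr pivot (j - pvScanI arr pivot (j - i + 1).toNat i j + 1).toNat (pvScanI arr pivot (j - i + 1).toNat i j) j) - 1) (by omega) (by omega)]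
      · rfl
    · rw [pvPart_stop pivot _ arr i j (by omega), pvPart_stop pivot _ arr i j (by omega)]

-- B's flat loop performs exactly A's i-scan while arr[i] < pivot
theorem pvBStep_scanI (pivot : Int) (arr : List Int) (j : Int) (fr : List (List Int)) :
    ∀ (f : Nat) (i : Int), f = (j - i + 1).toNat →
      pvBStep pivot arr i j fr = pvBStep pivot arr (pvScanI arr pivot f i j) j fr := by
  intro f
  induction f with
  | zero => intro i _; rfl
  | succ f ih =>
    intro i hf
    rw [pvScanI]
    split
    · rename_i h
      rw [pvBStep, dif_pos h.1, if_pos h.2]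
      exact ih (i + 1) (by omega)
    · rfl

-- B's flat loop then performs exactly A's j-scan while arr[j] > pivot (arr[i] ≥ pivot fixed)
theorem pvBStep_scanJ (pivot : Int) (arr : List Int) (i : Int) (fr : List (List Int))
    (hnp : ¬ pvAt arr i < pivot) :
    ∀ (f : Nat) (j : Int), f = (j - i + 1).toNat →
      pvBStep pivot arr i j fr = pvBStep pivot arr i (pvScanJ arr pivot f i j) fr := by
  intro f
  induction f with
  | zero => intro j _; rfl
  | succ f ih =>
    intro j hf
    rw [pvScanJ]
    split
    · rename_i h
      rw [pvBStep, dif_pos h.1, if_neg hnp, if_pos h.2]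
      exact ih (j - 1) (by omega)
    · rfl

-- B's flat partition loop computes exactly A's partition (state and frames)
theorem pvBStep_eq_part (pivot : Int) :
    ∀ (n : Nat) (arr : List Int) (i j : Int) (fr : List (List Int)),
      (j - i + 2).toNat ≤ n →
      pvBStep pivot arr i j fr =
        ((pvPart pivot (j - i + 1).toNat arr i j).1,
         (pvPart pivot (j - i + 1).toNat arr i j).2.1,
         (pvPart pivot (j - i + 1).toNat arr i j).2.2.1,
         fr ++ (pvPart pivot (j - i + 1).toNat arr i j).2.2.2) := by
  intro n
  induction n with
  | zero =>
    intro arr i j fr hn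
    have hij : j < i := by omega
    rw [pvPart_stop pivot _ arr i j hij, pvBStep, dif_neg (by omega)]
    simp
  | succ n ih =>
    intro arr i j fr hn
    by_cases hij : i ≤ j
    · obtain ⟨s, hs⟩ : ∃ s, (j - i + 1).toNat = s + 1 := ⟨(j - i).toNat, by omega⟩
      rw [hs, pvPart, if_pos hij]
      rw [pvBStep_scanI pivot arr j fr (j - i + 1).toNat i rfl]
      set i' := pvScanI arr pivot (j - i + 1).toNat i j with hi'
      have hge : i ≤ i' := pvScanI_ge arr pivot (j - i + 1).toNat i j
      rcases pvScanI_stop arr pivot (j - i + 1).toNat i j (le_refl _) with hbig | hnp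
      · -- i' > j: the j-scan fuel is 0, both sides stop at (arr, i', j)
        have hz : (j - i' + 1).toNat = 0 := by omega
        rw [hz]
        rw [show pvScanJ arr pivot 0 i' j = j from rfl]
        rw [if_neg (by omega)]
        rw [pvBStep, dif_neg (by omega)]
        simp
      · rw [pvBStep_scanJ pivot arr i' fr hnp (j - i' + 1).toNat j rfl]
        set j' := pvScanJ arr pivot (j - i' + 1).toNat i' j with hj'
        have hle : j' ≤ j := pvScanJ_le arr pivot (j - i' + 1).toNat i' j
        rcases pvScanJ_stop arr pivot (j - i' + 1).toNat i' j (le_refl _) with hsm | hnq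
        · rw [if_neg (by omega)]
          rw [pvBStep, dif_neg (by omega)]
          simp
        · by_cases hij' : i' ≤ j'
          · rw [if_pos hij']
            rw [pvBStep, dif_pos hij', if_neg hnp, if_neg hnq]
            rw [ih (pvSwap arr i' j') (i' + 1) (j' - 1) (fr ++ [pvSwap arr i' j']) (by omega)]
            rw [pvPart_mono pivot (j' - 1 - (i' + 1) + 1).toNat s (pvSwap arr i' j') (i' + 1) (j' - 1) (le_refl _) (by omega)]
            simp
          · rw [if_neg hij']
            rw [pvBStep, dif_neg hij']
            simp
    · rw [pvPart_stop pivot _ arr i j (by omega), pvBStep, dif_neg hij]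
      simp

-- i strictly advances and j strictly retreats across a nontrivial partition
theorem pvPart_bounds (arr : List Int) (l r : Int) (f : Nat) (hlr : l < r)
    (hf : (r - l + 1).toNat ≤ f) :
    l < (pvPart (pvAt arr (PySem.Int.floordiv (l + r) 2)) f arr l r).2.1 ∧
    (pvPart (pvAt arr (PySem.Int.floordiv (l + r) 2)) f arr l r).2.2.1 < r := by
  have hmid := PySem.Int.floordiv_two_mid_bounds (lo := l) (hi := r) (by omega)
  set m := PySem.Int.floordiv (l + r) 2 with hm
  set pivot := pvAt arr m with hp
  obtain ⟨f', rfl⟩ : ∃ f', f = f' + 1 := ⟨f - 1, by omega⟩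
  rw [pvPart]
  rw [if_pos (by omega : l ≤ r)]
  have hi' := pvScanI_le_mark arr pivot (r - l + 1).toNat l r m hmid.1 hmid.2
    (by rw [hp]; exact lt_irrefl _) (le_refl _)
  have hg := pvScanI_ge arr pivot (r - l + 1).toNat l r
  have hj' := pvScanJ_ge_mark arr pivot
    (r - pvScanI arr pivot (r - l + 1).toNat l r + 1).toNat
    (pvScanI arr pivot (r - l + 1).toNat l r) r m hi' hmid.2
    (by rw [hp]; exact lt_irrefl _) (le_refl _)
  have hl := pvScanJ_le arr pivot
    (r - pvScanI arr pivot (r - l + 1).toNat l r + 1).toNat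
    (pvScanI arr pivot (r - l + 1).toNat l r) r
  rw [if_pos (by omega : pvScanI arr pivot (r - l + 1).toNat l r ≤
    pvScanJ arr pivot (r - pvScanI arr pivot (r - l + 1).toNat l r + 1).toNat
      (pvScanI arr pivot (r - l + 1).toNat l r) r)]
  have hgi := pvPart_i_ge pivot f' (pvSwap arr (pvScanI arr pivot (r - l + 1).toNat l r)
      (pvScanJ arr pivot (r - pvScanI arr pivot (r - l + 1).toNat l r + 1).toNat
        (pvScanI arr pivot (r - l + 1).toNat l r) r))
      (pvScanI arr pivot (r - l + 1).toNat l r + 1)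
      (pvScanJ arr pivot (r - pvScanI arr pivot (r - l + 1).toNat l r + 1).toNat
        (pvScanI arr pivot (r - l + 1).toNat l r) r - 1)
  have hgj := pvPart_j_le pivot f' (pvSwap arr (pvScanI arr pivot (r - l + 1).toNat l r)
      (pvScanJ arr pivot (r - pvScanI arr pivot (r - l + 1).toNat l r + 1).toNat
        (pvScanI arr pivot (r - l + 1).toNat l r) r))
      (pvScanI arr pivot (r - l + 1).toNat l r + 1)
      (pvScanJ arr pivot (r - pvScanI arr pivot (r - l + 1).toNat l r + 1).toNat
        (pvScanI arr pivot (r - l + 1).toNat l r) r - 1)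
  constructor
  · exact lt_of_lt_of_le (by omega) hgi
  · exact lt_of_le_of_lt hgj (by omega)

-- a trivial range returns immediately whatever the fuel
theorem pvQuickRec_stop (f : Nat) (arr : List Int) (l r : Int) (h : l ≥ r) :
    pvQuickRec f arr l r = (arr, []) := by
  cases f with
  | zero => rfl
  | succ f => rw [pvQuickRec, if_pos h]

-- any two sufficient fuels give the same result
theorem pvQuickRec_mono (f f' : Nat) (arr : List Int) (l r : Int)
    (hf : (r - l + 1).toNat ≤ f) (hf' : (r - l + 1).toNat ≤ f') :
    pvQuickRec f arr l r = pvQuickRec f' arr l r := by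
  induction f generalizing f' arr l r with
  | zero => rw [pvQuickRec_stop 0 arr l r (by omega), pvQuickRec_stop f' arr l r (by omega)]
  | succ f ih =>
    by_cases hlr : l ≥ r
    · rw [pvQuickRec_stop _ arr l r hlr, pvQuickRec_stop _ arr l r hlr]
    · obtain ⟨g, rfl⟩ : ∃ g, f' = g + 1 := ⟨f' - 1, by omega⟩
      rw [pvQuickRec, pvQuickRec, if_neg hlr, if_neg hlr]
      have hb := pvPart_bounds arr l r (r - l + 1).toNat (by omega) (le_refl _)
      have hi := pvPart_i_ge (pvAt arr (PySem.Int.floordiv (l + r) 2)) (r - l + 1).toNat arr l r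
      have hj := pvPart_j_le (pvAt arr (PySem.Int.floordiv (l + r) 2)) (r - l + 1).toNat arr l r
      set p := pvPart (pvAt arr (PySem.Int.floordiv (l + r) 2)) (r - l + 1).toNat arr l r with hpd
      rw [ih g p.1 l p.2.2.1 (by omega) (by omega)]
      rw [ih g (pvQuickRec g p.1 l p.2.2.1).1 p.2.1 r (by omega) (by omega)]

-- fuel bound for the stack loop: each range (l, r) costs at most 3^(r-l+1) iterations
def pvM (stack : List (Int × Int)) : Nat :=
  (stack.map (fun lr => 3 ^ (lr.2 - lr.1 + 1).toNat)).sum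

theorem pvStackDec (l r b c : Int) (hlr : l < r) (hb : l < b) (hc : c < r) :
    3 ^ (c - l + 1).toNat + 3 ^ (r - b + 1).toNat < 3 ^ (r - l + 1).toNat := by
  have e1 : (c - l + 1).toNat ≤ (r - l).toNat := by omega
  have e2 : (r - b + 1).toNat ≤ (r - l).toNat := by omega
  calc 3 ^ (c - l + 1).toNat + 3 ^ (r - b + 1).toNat
      ≤ 3 ^ (r - l).toNat + 3 ^ (r - l).toNat :=
        Nat.add_le_add (Nat.pow_le_pow_right (by omega) e1) (Nat.pow_le_pow_right (by omega) e2)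
    _ < 3 ^ ((r - l).toNat + 1) := by
        have : 0 < 3 ^ (r - l).toNat := Nat.pow_pos (by omega)
        rw [Nat.pow_succ]; omega
    _ = 3 ^ (r - l + 1).toNat := by congr 1; omega

-- any two fuels that dominate the stack's iteration bound give the same result
theorem pvStackRun_mono (f f' : Nat) (arr : List Int) (stack : List (Int × Int))
    (frames : List (List Int)) (hf : pvM stack ≤ f) (hf' : pvM stack ≤ f') :
    pvStackRun f arr stack frames = pvStackRun f' arr stack frames := by
  induction f generalizing f' arr stack frames with
  | zero =>
    cases stack with
    | nil => cases f' <;> rfl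
    | cons hd tl =>
      exfalso
      have h1 : (1 : Nat) ≤ 3 ^ (hd.2 - hd.1 + 1).toNat := Nat.one_le_pow _ _ (by omega)
      have hM : pvM (hd :: tl) = 3 ^ (hd.2 - hd.1 + 1).toNat + pvM tl := by simp [pvM]
      omega
  | succ f ih =>
    cases stack with
    | nil => cases f' <;> rfl
    | cons hd tl =>
      obtain ⟨l, r⟩ := hd
      have hw : (1 : Nat) ≤ 3 ^ (r - l + 1).toNat := Nat.one_le_pow _ _ (by omega)
      have hM : pvM ((l, r) :: tl) = 3 ^ (r - l + 1).toNat + pvM tl := by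
        simp [pvM]
      obtain ⟨g, rfl⟩ : ∃ g, f' = g + 1 := ⟨f' - 1, by omega⟩
      rw [pvStackRun, pvStackRun]
      split
      · exact ih g arr tl frames (by omega) (by omega)
      · rename_i hlr
        rw [pvBStep_eq_part (pvAt arr (PySem.Int.floordiv (l + r) 2)) (r - l + 2).toNat arr l r frames (le_refl _)]
        have hb := pvPart_bounds arr l r (r - l + 1).toNat (by omega) (le_refl _)
        set p := pvPart (pvAt arr (PySem.Int.floordiv (l + r) 2)) (r - l + 1).toNat arr l r
          with hpd
        have hd := pvStackDec l r p.2.1 p.2.2.1 (by omega) hb.1 hb.2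
        have hM' : pvM ((l, p.2.2.1) :: (p.2.1, r) :: tl) =
            3 ^ (p.2.2.1 - l + 1).toNat + 3 ^ (r - p.2.1 + 1).toNat + pvM tl := by
          simp [pvM]; omega
        exact ih g p.1 ((l, p.2.2.1) :: (p.2.1, r) :: tl) (frames ++ p.2.2.2)
          (by omega) (by omega)

-- the stack loop on (l, r) :: rest behaves like A's recursion on (l, r)
-- followed by the loop on the remaining stack
theorem pvStackRun_sim (n : Nat) (f : Nat) (arr : List Int) (l r : Int)
    (rest : List (Int × Int)) (frames : List (List Int))
    (hn : (r - l + 1).toNat ≤ n) (hf : pvM ((l, r) :: rest) ≤ f) :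
    pvStackRun f arr ((l, r) :: rest) frames =
      pvStackRun (pvM rest) (pvQuickRec (r - l + 1).toNat arr l r).1 rest
        (frames ++ (pvQuickRec (r - l + 1).toNat arr l r).2) := by
  induction n generalizing f arr l r rest frames with
  | zero =>
    have hlr : l ≥ r := by omega
    have hw : (1 : Nat) ≤ 3 ^ (r - l + 1).toNat := Nat.one_le_pow _ _ (by omega)
    have hM : pvM ((l, r) :: rest) = 3 ^ (r - l + 1).toNat + pvM rest := by simp [pvM]
    obtain ⟨g, rfl⟩ : ∃ g, f = g + 1 := ⟨f - 1, by omega⟩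
    rw [pvStackRun, if_pos hlr, pvQuickRec_stop _ arr l r hlr]
    simpa using pvStackRun_mono g (pvM rest) arr rest frames (by omega) (le_refl _)
  | succ n ih =>
    have hw : (1 : Nat) ≤ 3 ^ (r - l + 1).toNat := Nat.one_le_pow _ _ (by omega)
    have hM : pvM ((l, r) :: rest) = 3 ^ (r - l + 1).toNat + pvM rest := by simp [pvM]
    obtain ⟨g, rfl⟩ : ∃ g, f = g + 1 := ⟨f - 1, by omega⟩
    by_cases hlr : l ≥ r
    · rw [pvStackRun, if_pos hlr, pvQuickRec_stop _ arr l r hlr]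
      simpa using pvStackRun_mono g (pvM rest) arr rest frames (by omega) (le_refl _)
    · rw [pvStackRun, if_neg hlr]
      rw [pvBStep_eq_part (pvAt arr (PySem.Int.floordiv (l + r) 2)) (r - l + 2).toNat arr l r frames (le_refl _)]
      have hb := pvPart_bounds arr l r (r - l + 1).toNat (by omega) (le_refl _)
      have hi := pvPart_i_ge (pvAt arr (PySem.Int.floordiv (l + r) 2)) (r - l + 1).toNat arr l r
      have hj := pvPart_j_le (pvAt arr (PySem.Int.floordiv (l + r) 2)) (r - l + 1).toNat arr l r
      set p := pvPart (pvAt arr (PySem.Int.floordiv (l + r) 2)) (r - l + 1).toNat arr l r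
        with hpd
      have hdec := pvStackDec l r p.2.1 p.2.2.1 (by omega) hb.1 hb.2
      have hM2 : pvM ((l, p.2.2.1) :: (p.2.1, r) :: rest) =
          3 ^ (p.2.2.1 - l + 1).toNat + 3 ^ (r - p.2.1 + 1).toNat + pvM rest := by
        simp [pvM]; omega
      have hM3 : pvM ((p.2.1, r) :: rest) = 3 ^ (r - p.2.1 + 1).toNat + pvM rest := by
        simp [pvM]
      rw [ih g p.1 l p.2.2.1 ((p.2.1, r) :: rest) (frames ++ p.2.2.2) (by omega) (by omega)]
      rw [ih (pvM ((p.2.1, r) :: rest)) (pvQuickRec (p.2.2.1 - l + 1).toNat p.1 l p.2.2.1).1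
        p.2.1 r rest _ (by omega) (le_refl _)]
      -- fold the two sub-recursions into the f+1-fuel unfolding of pvQuickRec on (l, r)
      obtain ⟨s, hs⟩ : ∃ s, (r - l + 1).toNat = s + 1 := ⟨(r - l + 1).toNat - 1, by omega⟩
      conv_rhs => rw [hs, pvQuickRec, if_neg hlr]
      rw [← hpd]
      rw [pvQuickRec_mono (p.2.2.1 - l + 1).toNat s p.1 l p.2.2.1 (le_refl _) (by omega)]
      rw [pvQuickRec_mono (r - p.2.1 + 1).toNat s
        (pvQuickRec s p.1 l p.2.2.1).1 p.2.1 r (le_refl _) (by omega)]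
      simp only [List.append_assoc]

-- ===== VERDICT (by name: the statement is the Claim_ definition above) =====
theorem quick_sort_anim_spec : Claim_equal_quick_sort_anim := by
  intro arr _
  unfold Spec_quick_sort_anim quick_sort_anim quick_sort_anim_alt
  have hlen : (((arr.length : Int) - 1) - 0 + 1).toNat = arr.length := by omega
  have hM1 : pvM [(0, (arr.length : Int) - 1)] = 3 ^ arr.length := by
    simp [pvM]
  rw [pvStackRun_sim arr.length (3 ^ arr.length) arr 0 ((arr.length : Int) - 1) [] []
    (by omega) (by rw [hM1])]
  rw [show pvM ([] : List (Int × Int)) = 0 from rfl]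
  rw [pvStackRun]
  rw [pvQuickRec_mono (((arr.length : Int) - 1) - 0 + 1).toNat arr.length arr 0
    ((arr.length : Int) - 1) (le_refl _) (by omega)]
  simp
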